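-- pv_equiv track=rewrite | github.com/mjs375/Portfolio | 7kyu/TripleX.py | triple_x
-- ===== SOURCE A (Python) =====
-- def triple_x(s):
--     for i in range(0, len(s)-2):
--         if s[i] == "x":
--             if s[i+1] == "x" and s[i+2] == "x":
--                 return True
--             else:
--                 return False
--     else:
--         return False
-- ===== SOURCE B (Python) =====
-- def triple_x(s):
--     # Reduce to run decomposition: blank out every non-'x', split into the
--     # maximal runs of 'x', and test whether the first run is at least 3 long.
--     runs = "".join(c if c == "x" else " " for c in s).split()
--     return bool(runs) and len(runs[0]) >= 3
-- ===== Notes on version B (the rewrite author's own statement) =====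
-- stated objective: alternative
-- what changed: Recasts the task as run decomposition: blank out every other character, split the masked string into the maximal runs of the target letter, and test whether the first run has length >= 3, replacing A's index loop with lookahead comparisons by staged whole-string passes (mask, split, length test).
import Mathlib
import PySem

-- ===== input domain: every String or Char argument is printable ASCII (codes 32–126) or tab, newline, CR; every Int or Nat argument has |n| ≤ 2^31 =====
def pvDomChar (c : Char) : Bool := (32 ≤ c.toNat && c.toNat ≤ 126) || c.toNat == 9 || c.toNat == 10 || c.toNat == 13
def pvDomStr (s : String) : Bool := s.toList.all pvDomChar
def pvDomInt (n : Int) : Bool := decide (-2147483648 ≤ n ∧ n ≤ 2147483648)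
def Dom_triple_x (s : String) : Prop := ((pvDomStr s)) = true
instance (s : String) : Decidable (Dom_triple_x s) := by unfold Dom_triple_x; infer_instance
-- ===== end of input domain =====

-- B restates the task as run decomposition: blank out every other character, split the result
-- into the maximal runs of the target letter, and test whether the first run has length ≥ 3 (alternative decomposition, same cost).

-- ===== PORT A =====
-- for i in range(0, len(s)-2): if s[i]=='x': return s[i+1]=='x' and s[i+2]=='x'; else after the loop: return False
def triple_x_go (cs : List Char) : List Int → Bool
  | [] => false
  | i :: rest =>
      if PySem.List.pyGetD cs i ' ' == 'x' then
        PySem.List.pyGetD cs (i + 1) ' ' == 'x' && PySem.List.pyGetD cs (i + 2) ' ' == 'x'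
      else triple_x_go cs rest

def triple_x (s : String) : Bool :=
  triple_x_go s.toList (PySem.List.pyRange 0 ((s.toList.length : Int) - 2) 1)

-- ===== PORT B =====
-- runs = "".join(c if c == "x" else " " for c in s).split(); return bool(runs) and len(runs[0]) >= 3
def triple_x_alt (s : String) : Bool :=
  let masked := PySem.Chars.join [] (s.toList.map (fun c => [if c == 'x' then c else ' ']))
  let runs := PySem.Chars.split₀ masked
  !runs.isEmpty && decide (3 ≤ (PySem.List.pyGetD runs 0 []).length)

-- ===== PRECONDITION & SPEC =====
def Spec_triple_x (s : String) (out : Bool) : Prop := out = triple_x_alt s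
instance (s : String) (out : Bool) : Decidable (Spec_triple_x s out) := by unfold Spec_triple_x; infer_instance

-- ===== CLAIM (what is proved, stated in full; the proofs are below) =====
def Claim_equal_triple_x : Prop := ∀ (s : String), Dom_triple_x s → Spec_triple_x s (triple_x s)

-- ===== LEMMAS AND PROOFS =====

-- structural form of A's loop: scan the suffixes that still have ≥ 3 characters
def loopS : List Char → Bool
  | c1 :: c2 :: c3 :: rest =>
      if c1 == 'x' then c2 == 'x' && c3 == 'x' else loopS (c2 :: c3 :: rest)
  | _ => false

lemma loopS_short (cs : List Char) (h : cs.length < 3) : loopS cs = false := by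
  match cs, h with
  | [], _ => rfl
  | [_], _ => rfl
  | [_, _], _ => rfl

lemma go_eq_loopS (cs : List Char) (k : Nat) (hk : k ≤ cs.length) :
    triple_x_go cs (PySem.List.pyRange (k : Int) ((cs.length : Int) - 2) 1) = loopS (cs.drop k) := by
  by_cases h : (k : Int) < (cs.length : Int) - 2
  · have hk3 : k + 2 < cs.length := by omega
    rw [PySem.List.pyRange_one_cons h]
    have h0 : PySem.List.pyGetD cs (k : Int) ' ' = cs[k] := by
      have := PySem.List.pyGetD_eq_getElem (xs := cs) (i := (k : Int)) (d := ' ')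
        (by omega) (by exact_mod_cast by omega)
      simpa using this
    have h1 : PySem.List.pyGetD cs ((k : Int) + 1) ' ' = cs[k + 1] := by
      have := PySem.List.pyGetD_eq_getElem (xs := cs) (i := (k : Int) + 1) (d := ' ')
        (by omega) (by exact_mod_cast by omega)
      simpa using this
    have h2 : PySem.List.pyGetD cs ((k : Int) + 2) ' ' = cs[k + 2] := by
      have := PySem.List.pyGetD_eq_getElem (xs := cs) (i := (k : Int) + 2) (d := ' ')
        (by omega) (by exact_mod_cast by omega)
      simpa using this
    have hdrop : cs.drop k = cs[k] :: cs[k + 1] :: cs[k + 2] :: cs.drop (k + 3) := by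
      rw [List.drop_eq_getElem_cons (by omega), List.drop_eq_getElem_cons (h := by omega),
        List.drop_eq_getElem_cons (h := by omega)]
    have hrec := go_eq_loopS cs (k + 1) (by omega)
    simp only [triple_x_go, h0, h1, h2]
    rw [show (k : Int) + 1 = ((k + 1 : Nat) : Int) by push_cast; ring] at *
    rw [hrec, hdrop]
    by_cases hx : cs[k] = 'x'
    · simp [hx, loopS]
    · have hb : (cs[k] == 'x') = false := by simp [hx]
      simp only [loopS, hb, Bool.false_eq_true, if_false]
      rw [List.drop_eq_getElem_cons (h := by omega), List.drop_eq_getElem_cons (h := by omega)]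
  · have : PySem.List.pyRange (k : Int) ((cs.length : Int) - 2) 1 = [] := by
      simp [PySem.List.pyRange]; omega
    rw [this]
    have : (cs.drop k).length < 3 := by simp; omega
    rw [loopS_short _ this]; rfl
termination_by cs.length - k

-- the masking character map of B
def maskC (c : Char) : Char := if c == 'x' then c else ' '

-- split₀.go flushes a nonempty accumulator in front of the rest of its output
lemma go_acc (ms cur acc) :
    PySem.Chars.split₀.go ms cur acc = acc.reverse ++ PySem.Chars.split₀.go ms cur [] := by
  induction ms generalizing cur acc with
  | nil =>
      by_cases hcur : cur.isEmpty <;> simp [PySem.Chars.split₀.go, hcur]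
  | cons c rest ih =>
      by_cases hsp : PySem.Chars.isspace c
      · by_cases hcur : cur.isEmpty
        · simp only [PySem.Chars.split₀.go, hsp, hcur, if_true]
          exact ih [] acc
        · simp only [PySem.Chars.split₀.go, hsp, hcur, if_true, Bool.false_eq_true, if_false]
          rw [ih [] (cur.reverse :: acc), ih [] [cur.reverse]]
          simp
      · simp only [PySem.Chars.split₀.go, hsp, Bool.false_eq_true, if_false]
        exact ih (c :: cur) acc

lemma go_ne_nil (ms cur) (h : cur ≠ []) : PySem.Chars.split₀.go ms cur [] ≠ [] := by
  induction ms generalizing cur with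
  | nil =>
      have : cur.isEmpty = false := by simpa [List.isEmpty_iff]
      simp [PySem.Chars.split₀.go, this]
  | cons c rest ih =>
      by_cases hsp : PySem.Chars.isspace c
      · have hcur : cur.isEmpty = false := by simpa [List.isEmpty_iff]
        simp only [PySem.Chars.split₀.go, hsp, hcur, if_true, Bool.false_eq_true, if_false]
        rw [go_acc]
        simp
      · simp only [PySem.Chars.split₀.go, hsp, Bool.false_eq_true, if_false]
        exact ih (c :: cur) (by simp)

-- first word produced by split₀.go from a nonempty accumulator
lemma go_head (ms cur) (h : cur ≠ []) :
    (PySem.Chars.split₀.go ms cur []).headD [] =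
      cur.reverse ++ ms.takeWhile (fun c => !PySem.Chars.isspace c) := by
  induction ms generalizing cur with
  | nil =>
      have : cur.isEmpty = false := by simpa [List.isEmpty_iff]
      simp [PySem.Chars.split₀.go, this]
  | cons c rest ih =>
      by_cases hsp : PySem.Chars.isspace c
      · have hcur : cur.isEmpty = false := by simpa [List.isEmpty_iff]
        simp only [PySem.Chars.split₀.go, hsp, hcur, if_true, Bool.false_eq_true, if_false]
        rw [go_acc]
        simp [List.takeWhile, hsp]
      · simp only [PySem.Chars.split₀.go, hsp, Bool.false_eq_true, if_false]
        rw [ih (c :: cur) (by simp)]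
        simp [List.takeWhile, hsp]

-- B on the list side
def altL (cs : List Char) : Bool :=
  let runs := PySem.Chars.split₀ (cs.map maskC)
  !runs.isEmpty && decide (3 ≤ (PySem.List.pyGetD runs 0 []).length)

lemma isspace_maskC (c : Char) : PySem.Chars.isspace (maskC c) = !(c == 'x') := by
  by_cases h : c = 'x' <;> simp [maskC, h, PySem.Chars.isspace]

lemma loopS_eq_altL (cs : List Char) : loopS cs = altL cs := by
  induction cs with
  | nil => rfl
  | cons c cs ih =>
      by_cases hc : c = 'x'
      · subst hc
        -- runs = go (map maskC cs) ['x'] [], nonempty; first word = 'x' :: takeWhile (== 'x') cs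
        have hmask : maskC 'x' = 'x' := by simp [maskC]
        have hsp : PySem.Chars.isspace 'x' = false := by
          have := isspace_maskC 'x'; simpa [hmask] using this
        have hne := go_ne_nil (cs.map maskC) ['x'] (by simp)
        have hhead := go_head (cs.map maskC) ['x'] (by simp)
        have htw : (cs.map maskC).takeWhile (fun c => !PySem.Chars.isspace c)
            = (cs.takeWhile (fun c => c == 'x')).map maskC := by
          rw [List.takeWhile_map]
          have hpred : ((fun c => !PySem.Chars.isspace c) ∘ maskC) = (fun c : Char => c == 'x') := by
            funext d
            simp [isspace_maskC]
          rw [hpred]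
        simp only [altL, List.map_cons, hmask, PySem.Chars.split₀,
          PySem.Chars.split₀.go, hsp, Bool.false_eq_true, if_false]
        rw [PySem.List.pyGetD_zero]
        have hgetD : (PySem.Chars.split₀.go (cs.map maskC) ['x'] []).getD 0 []
            = (PySem.Chars.split₀.go (cs.map maskC) ['x'] []).headD [] := by
          cases PySem.Chars.split₀.go (cs.map maskC) ['x'] [] <;> rfl
        rw [hgetD, hhead, htw]
        have hempty : (PySem.Chars.split₀.go (cs.map maskC) ['x'] []).isEmpty = false := by
          simpa [List.isEmpty_iff] using hne
        rw [hempty]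
        simp only [Bool.not_false, Bool.true_and, List.length_append, List.length_map,
          List.length_reverse, List.length_cons, List.length_nil]
        -- goal: loopS-cases = decide (3 ≤ 1 + |takeWhile (== 'x') cs|)
        match cs with
        | [] => simp [loopS]
        | [a] => by_cases ha : a = 'x' <;> simp [loopS, List.takeWhile_cons, ha]
        | a :: b :: rest =>
            by_cases ha : a = 'x' <;> by_cases hb : b = 'x' <;>
              simp [loopS, List.takeWhile_cons, ha, hb] <;> omega
      · -- c is blanked to a space skipped with empty accumulator
        have hmask : maskC c = ' ' := by simp [maskC, hc]
        have hsp : PySem.Chars.isspace ' ' = true := by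
          have := isspace_maskC c
          simp only [hmask] at this
          simp [this, hc]
        have hloop : loopS (c :: cs) = loopS cs := by
          match cs with
          | [] => rfl
          | [_] => rfl
          | a :: b :: rest => simp [loopS, hc]
        rw [hloop, ih]
        simp only [altL, List.map_cons, hmask, PySem.Chars.split₀, PySem.Chars.split₀.go,
          hsp, if_true, List.isEmpty_nil]
        rfl

-- ===== VERDICT (by name: the statement is the Claim_ definition above) =====
theorem triple_x_spec : Claim_equal_triple_x := by
  intro s _
  unfold Spec_triple_x triple_x triple_x_alt
  have := go_eq_loopS s.toList 0 (Nat.zero_le _)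
  simp only [Int.natCast_zero] at this
  rw [this, List.drop_zero, loopS_eq_altL]
  unfold altL
  have hjoin : PySem.Chars.join []
      (s.toList.map (fun c => [if c == 'x' then c else ' '])) = s.toList.map maskC := by
    have hm : s.toList.map (fun c => [if c == 'x' then c else ' '])
        = (s.toList.map maskC).map (fun c => [c]) := by
      simp [maskC, Function.comp]
    rw [hm, PySem.Chars.join_nil_singletons]
  simp only [hjoin]
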